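-- pv_equiv track=rewrite | github.com/Cooper-Loggins/assignment-5-render | app.py | merge_transcript_segments
-- ===== SOURCE A (Python) =====
-- def merge_transcript_segments(segments):
--     merged = ""
--     for raw_segment in segments:
--         segment = " ".join((raw_segment or "").strip().split())
--         if not segment or segment == "(no speech detected)":
--             continue
--         if not merged:
--             merged = segment
--             continue
--
--         merged_words = merged.split()
--         segment_words = segment.split()
--         overlap = 0
--         max_overlap = min(len(merged_words), len(segment_words), 6)
--         for size in range(max_overlap, 0, -1):
--             if [word.lower() for word in merged_words[-size:]] == [word.lower() for word in segment_words[:size]]: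
--                 overlap = size
--                 break
--
--         if overlap:
--             merged = " ".join(merged_words + segment_words[overlap:])
--         else:
--             merged = f"{merged} {segment}"
--
--     return merged.strip()
-- ===== SOURCE B (Python) =====
-- def merge_transcript_segments(segments):
--     # Staged pipeline: normalize/filter all segments first, then fold word
--     # lists together.  The overlap is found bitap-style: one left-to-right
--     # pass over the (lowercased) 6-word tail keeps the list of alignment
--     # start positions that still match the segment head; the smallest
--     # survivor gives the longest overlap.  Joined to a string once, at the end.
--     chunks = [ws for ws in ((raw or "").split() for raw in segments)
--               if ws and ws != ["(no", "speech", "detected)"]]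
--     if not chunks:
--         return ""
--     words = list(chunks[0])
--     for seg in chunks[1:]:
--         tail = [w.lower() for w in words[-6:]]
--         head = [w.lower() for w in seg[:6]]
--         alive = list(range(len(tail) - min(len(tail), len(head)), len(tail)))
--         for i, w in enumerate(tail):
--             alive = [p for p in alive if i < p or w == head[i - p]]
--         overlap = len(tail) - alive[0] if alive else 0
--         words += seg[overlap:]
--     return " ".join(words)
-- ===== Notes on version B (the rewrite author's own statement) =====
-- stated objective: faster
-- what changed: B is a staged pipeline (normalize+filter all segments first, then fold word lists, join once) and finds the overlap bitap-style: a single left-to-right pass over the lowercased 6-word tail keeps the list of surviving alignment positions and the smallest survivor gives the overlap, instead of A's re-splitting the whole merged string each segment and comparing slices per candidate size.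
import Mathlib
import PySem

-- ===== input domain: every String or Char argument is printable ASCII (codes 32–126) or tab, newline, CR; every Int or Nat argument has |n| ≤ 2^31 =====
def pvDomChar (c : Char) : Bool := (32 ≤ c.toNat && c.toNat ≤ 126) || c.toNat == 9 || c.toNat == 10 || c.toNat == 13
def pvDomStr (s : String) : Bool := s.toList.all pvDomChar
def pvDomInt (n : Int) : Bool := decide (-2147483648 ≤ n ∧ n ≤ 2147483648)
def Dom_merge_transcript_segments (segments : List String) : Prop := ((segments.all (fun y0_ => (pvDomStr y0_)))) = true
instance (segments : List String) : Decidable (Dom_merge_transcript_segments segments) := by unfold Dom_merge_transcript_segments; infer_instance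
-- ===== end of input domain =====

-- B normalizes/filters all segments first, folds word lists with a bitap-style
-- one-pass survivor-set overlap search, and joins to a string once at the end.


-- ===== PORT A =====
-- A's 'for size in range(max_overlap, 0, -1): … break' search, counted down from max_overlap
def pvOverlapA (merged_words segment_words : List String) : Nat → Nat
  | 0 => 0
  | size + 1 =>
    if (PySem.List.slice merged_words (some (-((size + 1 : Nat) : Int))) none).map PySem.Str.lower
        == (PySem.List.slice segment_words none (some ((size + 1 : Nat) : Int))).map PySem.Str.lower
    then size + 1
    else pvOverlapA merged_words segment_words size

-- the body of A's for-loop ('raw_segment or ""' is the identity on str arguments)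
def pvStepA (merged : String) (raw_segment : String) : String :=
  let segment := PySem.Str.join " " (PySem.Str.split₀ (PySem.Str.strip raw_segment))
  if segment == "" || segment == "(no speech detected)" then merged
  else if merged == "" then segment
  else
    let merged_words := PySem.Str.split₀ merged
    let segment_words := PySem.Str.split₀ segment
    let max_overlap := min (min merged_words.length segment_words.length) 6
    let overlap := pvOverlapA merged_words segment_words max_overlap
    if overlap ≠ 0 then
      PySem.Str.join " " (merged_words ++ PySem.List.slice segment_words (some (overlap : Int)) none)
    else merged ++ " " ++ segment

def merge_transcript_segments (segments : List String) : String :=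
  PySem.Str.strip (segments.foldl pvStepA "")

-- ===== PORT B =====
-- B stage 1: '[ws for ws in ((raw or "").split() for raw in segments) if ws and ws != [...]]'
def pvCleanB (segments : List String) : List (List String) :=
  (segments.map (fun raw => PySem.Str.split₀ raw)).filter
    (fun ws => !(ws == ([] : List String)) && !(ws == ["(no", "speech", "detected)"]))

-- the survivor test of B's inner comprehension: 'i < p or w == head[i - p]'
def pvAliveFilter (hd : List String) (iw : Int × String) (p : Int) : Bool :=
  decide (iw.1 < p) || (PySem.List.pyGet? hd (iw.1 - p) == some iw.2)

-- the body of B's merging loop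
def pvStepB (words seg : List String) : List String :=
  let tl := (PySem.List.slice words (some (-6)) none).map PySem.Str.lower
  let hd := (PySem.List.slice seg none (some 6)).map PySem.Str.lower
  let alive0 := PySem.List.pyRange ((tl.length : Int) - (min tl.length hd.length : Nat)) (tl.length : Int) 1
  let alive := (PySem.List.enumerate tl 0).foldl (fun alive iw => alive.filter (pvAliveFilter hd iw)) alive0
  let overlap : Int := match alive with | [] => 0 | p :: _ => (tl.length : Int) - p
  words ++ PySem.List.slice seg (some overlap) none

def merge_transcript_segments_alt (segments : List String) : String :=
  match pvCleanB segments with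
  | [] => ""
  | c :: cs => PySem.Str.join " " (cs.foldl pvStepB c)

-- ===== PRECONDITION & SPEC =====
def Spec_merge_transcript_segments (segments : List String) (out : String) : Prop := out = merge_transcript_segments_alt segments
instance (segments : List String) (out : String) : Decidable (Spec_merge_transcript_segments segments out) := by unfold Spec_merge_transcript_segments; infer_instance

-- ===== CLAIM (what is proved, stated in full; the proofs are below) =====
def Claim_equal_merge_transcript_segments : Prop := ∀ (segments : List String), Dom_merge_transcript_segments segments → Spec_merge_transcript_segments segments (merge_transcript_segments segments)

-- ===== LEMMAS AND PROOFS =====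

def pvGoodW (w : List Char) : Prop := w ≠ [] ∧ ∀ c ∈ w, PySem.Chars.isspace c = false
def pvGoodL (ws : List (List Char)) : Prop := ∀ w ∈ ws, pvGoodW w

theorem pv_go_nil (cur : List Char) (acc : List (List Char)) :
    PySem.Chars.split₀.go [] cur acc = if cur.isEmpty then acc.reverse else (cur.reverse :: acc).reverse := rfl
theorem pv_go_cons (c : Char) (rest cur : List Char) (acc : List (List Char)) :
    PySem.Chars.split₀.go (c :: rest) cur acc =
      if PySem.Chars.isspace c then
        (if cur.isEmpty then PySem.Chars.split₀.go rest [] acc else PySem.Chars.split₀.go rest [] (cur.reverse :: acc))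
      else PySem.Chars.split₀.go rest (c :: cur) acc := rfl

theorem pv_go_word (w : List Char) (hw : ∀ c ∈ w, PySem.Chars.isspace c = false) :
    ∀ s cur acc, PySem.Chars.split₀.go (w ++ s) cur acc = PySem.Chars.split₀.go s (w.reverse ++ cur) acc := by
  induction w with
  | nil => intro s cur acc; simp
  | cons c w ih =>
    intro s cur acc
    have hc : PySem.Chars.isspace c = false := hw c (by simp)
    rw [List.cons_append, pv_go_cons, hc]
    simp only [Bool.false_eq_true, if_false]
    rw [ih (fun d hd => hw d (by simp [hd])) s (c :: cur) acc]
    simp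

theorem pv_go_spaces (sp : List Char) (hsp : ∀ c ∈ sp, PySem.Chars.isspace c = true) :
    ∀ cur acc, PySem.Chars.split₀.go sp cur acc = PySem.Chars.split₀.go [] cur acc := by
  induction sp with
  | nil => intro cur acc; rfl
  | cons c sp ih =>
    intro cur acc
    have hc := hsp c (by simp)
    rw [pv_go_cons, hc, if_pos rfl, pv_go_nil]
    by_cases hcur : cur.isEmpty
    · rw [if_pos hcur, if_pos hcur, ih (fun d hd => hsp d (by simp [hd])), pv_go_nil]
      simp
    · rw [if_neg hcur, if_neg hcur, ih (fun d hd => hsp d (by simp [hd])), pv_go_nil]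
      simp

theorem pv_go_append_spaces (s sp : List Char) (hsp : ∀ c ∈ sp, PySem.Chars.isspace c = true) :
    ∀ cur acc, PySem.Chars.split₀.go (s ++ sp) cur acc = PySem.Chars.split₀.go s cur acc := by
  induction s with
  | nil => intro cur acc; exact pv_go_spaces sp hsp cur acc
  | cons c s ih =>
    intro cur acc
    rw [List.cons_append, pv_go_cons, pv_go_cons]
    by_cases hc : PySem.Chars.isspace c
    · rw [if_pos hc, if_pos hc]
      by_cases hcur : cur.isEmpty
      · rw [if_pos hcur, if_pos hcur, ih]
      · rw [if_neg hcur, if_neg hcur, ih]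
    · rw [if_neg hc, if_neg hc, ih]

theorem pv_go_dropWhile (s : List Char) (acc : List (List Char)) :
    PySem.Chars.split₀.go (List.dropWhile PySem.Chars.isspace s) [] acc = PySem.Chars.split₀.go s [] acc := by
  induction s with
  | nil => rfl
  | cons c s ih =>
    by_cases hc : PySem.Chars.isspace c
    · rw [List.dropWhile_cons_of_pos hc, ih, pv_go_cons, if_pos hc]
      simp
    · rw [List.dropWhile_cons_of_neg hc]

theorem pv_split_strip (s : List Char) :
    PySem.Chars.split₀ (PySem.Chars.strip s) = PySem.Chars.split₀ s := by
  show PySem.Chars.split₀.go _ [] [] = PySem.Chars.split₀.go s [] []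
  unfold PySem.Chars.strip PySem.Chars.rstrip PySem.Chars.lstrip
  set t := List.dropWhile PySem.Chars.isspace s with ht
  have hdecomp : t = (List.dropWhile PySem.Chars.isspace t.reverse).reverse
      ++ (List.takeWhile PySem.Chars.isspace t.reverse).reverse := by
    conv_lhs => rw [← List.reverse_reverse t, ← List.takeWhile_append_dropWhile (p := PySem.Chars.isspace) (l := t.reverse)]
    rw [List.reverse_append]
  calc PySem.Chars.split₀.go (List.dropWhile PySem.Chars.isspace t.reverse).reverse [] []
      = PySem.Chars.split₀.go ((List.dropWhile PySem.Chars.isspace t.reverse).reverse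
          ++ (List.takeWhile PySem.Chars.isspace t.reverse).reverse) [] [] :=
        (pv_go_append_spaces _ _ (fun c hc => List.mem_takeWhile_imp (List.mem_reverse.mp hc)) [] []).symm
    _ = PySem.Chars.split₀.go t [] [] := by rw [← hdecomp]
    _ = PySem.Chars.split₀.go s [] [] := pv_go_dropWhile s []

theorem pv_split_good (s : List Char) : pvGoodL (PySem.Chars.split₀ s) := by
  suffices h : ∀ s cur acc, (∀ c ∈ cur, PySem.Chars.isspace c = false) → pvGoodL acc →
      pvGoodL (PySem.Chars.split₀.go s cur acc) by
    exact h s [] [] (by simp) (by intro w hw; simp at hw)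
  intro s
  induction s with
  | nil =>
    intro cur acc hcur hacc
    rw [pv_go_nil]
    by_cases hc : cur.isEmpty
    · rw [if_pos hc]; intro w hw; exact hacc w (List.mem_reverse.mp hw)
    · rw [if_neg hc]
      intro w hw
      rw [List.mem_reverse, List.mem_cons] at hw
      rcases hw with h | h
      · subst h
        refine ⟨by simpa [List.isEmpty_iff] using hc, fun c hc' => hcur c (List.mem_reverse.mp hc')⟩
      · exact hacc w h
  | cons c rest ih =>
    intro cur acc hcur hacc
    rw [pv_go_cons]
    by_cases hc : PySem.Chars.isspace c
    · rw [if_pos hc]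
      by_cases hcur' : cur.isEmpty
      · rw [if_pos hcur']; exact ih [] acc (by simp) hacc
      · rw [if_neg hcur']
        refine ih [] _ (by simp) ?_
        intro w hw
        rw [List.mem_cons] at hw
        rcases hw with h | h
        · subst h
          exact ⟨by simpa [List.isEmpty_iff] using hcur', fun d hd => hcur d (List.mem_reverse.mp hd)⟩
        · exact hacc w h
    · rw [if_neg hc]
      refine ih (c :: cur) acc ?_ hacc
      intro d hd
      rw [List.mem_cons] at hd
      rcases hd with h | h
      · subst h; simpa using hc
      · exact hcur d h

theorem pv_join_split (ws : List (List Char)) (h : pvGoodL ws) :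
    PySem.Chars.split₀ (PySem.Chars.join [' '] ws) = ws := by
  suffices key : ∀ ws acc, pvGoodL ws →
      PySem.Chars.split₀.go (List.intercalate [' '] ws) [] acc = acc.reverse ++ ws by
    simpa [PySem.Chars.join] using key ws [] h
  intro ws
  induction ws with
  | nil => intro acc _; simp [List.intercalate, pv_go_nil]
  | cons w tail ih =>
    intro acc hg
    have hw : pvGoodW w := hg w (by simp)
    cases tail with
    | nil =>
      have : List.intercalate [' '] [w] = w := by simp [List.intercalate]
      rw [this, ← List.append_nil w, pv_go_word w hw.2 [] [] acc, pv_go_nil]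
      have : (w.reverse ++ []).isEmpty = false := by
        simp [hw.1]
      rw [this]
      simp
    | cons x rest =>
      have hcc : List.intercalate [' '] (w :: x :: rest) = w ++ ' ' :: List.intercalate [' '] (x :: rest) := by
        simp [List.intercalate]
      rw [hcc, pv_go_word w hw.2 _ [] acc, pv_go_cons]
      have hsp : PySem.Chars.isspace ' ' = true := by decide
      rw [if_pos hsp]
      have : (w.reverse ++ []).isEmpty = false := by simp [hw.1]
      rw [this]
      simp only [Bool.false_eq_true, if_false, List.append_nil, List.reverse_reverse]
      rw [ih (w :: acc) (fun v hv => hg v (by simp [hv]))]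
      simp

theorem pv_join_head (ws : List (List Char)) (h : pvGoodL ws) (hne : ws ≠ []) :
    ∃ c t, PySem.Chars.join [' '] ws = c :: t ∧ PySem.Chars.isspace c = false := by
  cases ws with
  | nil => exact absurd rfl hne
  | cons w tail =>
    have hw : pvGoodW w := h w (by simp)
    obtain ⟨c, w', hw'⟩ := List.exists_cons_of_ne_nil hw.1
    cases tail with
    | nil =>
      exact ⟨c, w', by simp [PySem.Chars.join, List.intercalate, hw'], hw.2 c (by simp [hw'])⟩
    | cons x rest =>
      refine ⟨c, w' ++ ' ' :: List.intercalate [' '] (x :: rest), ?_, hw.2 c (by simp [hw'])⟩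
      simp [PySem.Chars.join, List.intercalate, hw']

theorem pv_join_last (ws : List (List Char)) (h : pvGoodL ws) (hne : ws ≠ []) :
    ∃ p c, PySem.Chars.join [' '] ws = p ++ [c] ∧ PySem.Chars.isspace c = false := by
  induction ws with
  | nil => exact absurd rfl hne
  | cons w tail ih =>
    have hw : pvGoodW w := h w (by simp)
    cases tail with
    | nil =>
      refine ⟨w.dropLast, w.getLast hw.1, ?_, hw.2 _ (List.getLast_mem hw.1)⟩
      simp [PySem.Chars.join, List.intercalate, List.dropLast_append_getLast hw.1]
    | cons x rest =>
      obtain ⟨p, c, hpc, hc⟩ := ih (fun v hv => h v (by simp [hv])) (by simp)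
      refine ⟨w ++ ' ' :: p, c, ?_, hc⟩
      have : PySem.Chars.join [' '] (w :: x :: rest) = w ++ ' ' :: PySem.Chars.join [' '] (x :: rest) := by
        simp [PySem.Chars.join, List.intercalate]
      rw [this, hpc]
      simp

theorem pv_join_ne_nil (ws : List (List Char)) (h : pvGoodL ws) (hne : ws ≠ []) :
    PySem.Chars.join [' '] ws ≠ [] := by
  obtain ⟨c, t, he, -⟩ := pv_join_head ws h hne
  simp [he]

theorem pv_strip_join (ws : List (List Char)) (h : pvGoodL ws) :
    PySem.Chars.strip (PySem.Chars.join [' '] ws) = PySem.Chars.join [' '] ws := by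
  cases hws : ws with
  | nil => rfl
  | cons w tail =>
    rw [← hws]
    have hne : ws ≠ [] := by simp [hws]
    obtain ⟨c, t, he, hc⟩ := pv_join_head ws h hne
    obtain ⟨p, d, he', hd⟩ := pv_join_last ws h hne
    unfold PySem.Chars.strip PySem.Chars.lstrip PySem.Chars.rstrip
    rw [he, List.dropWhile_cons_of_neg (by simp [hc]), ← he, he']
    rw [List.reverse_append, List.reverse_singleton, List.singleton_append,
      List.dropWhile_cons_of_neg (by simp [hd])]
    simp

theorem pv_join_append (ws ws' : List (List Char)) (hne : ws ≠ []) (hne' : ws' ≠ []) :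
    PySem.Chars.join [' '] (ws ++ ws') = PySem.Chars.join [' '] ws ++ ' ' :: PySem.Chars.join [' '] ws' := by
  induction ws with
  | nil => exact absurd rfl hne
  | cons w tail ih =>
    cases tail with
    | nil =>
      obtain ⟨x, rest, hx⟩ := List.exists_cons_of_ne_nil hne'
      subst hx
      simp [PySem.Chars.join, List.intercalate]
    | cons x rest =>
      have h1 : PySem.Chars.join [' '] ((x :: rest) ++ ws') = PySem.Chars.join [' '] (x :: rest) ++ ' ' :: PySem.Chars.join [' '] ws' := ih (by simp)
      have hcc : ∀ (l : List (List Char)), PySem.Chars.join [' '] (w :: x :: l) = w ++ ' ' :: PySem.Chars.join [' '] (x :: l) := by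
        intro l; simp [PySem.Chars.join, List.intercalate]
      have : (w :: x :: rest) ++ ws' = w :: x :: (rest ++ ws') := by simp
      rw [this]
      cases ws' with
      | nil => exact absurd rfl hne'
      | cons y t =>
        rw [hcc (rest ++ (y :: t)), hcc rest]
        have := h1
        simp only [List.cons_append] at this
        rw [this]
        simp

def pvGoodS (ws : List String) : Prop := pvGoodL (ws.map String.toList)

theorem pvS_join_toList (ws : List String) :
    (PySem.Str.join " " ws).toList = PySem.Chars.join [' '] (ws.map String.toList) := by
  simp [PySem.Str.join]

theorem pvS_split_eq (s : String) :
    PySem.Str.split₀ s = (PySem.Chars.split₀ s.toList).map String.ofList := rfl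

theorem pvS_split_join (ws : List String) (h : pvGoodS ws) :
    PySem.Str.split₀ (PySem.Str.join " " ws) = ws := by
  rw [pvS_split_eq, pvS_join_toList, pv_join_split _ h]
  simp [List.map_map, Function.comp_def]

theorem pvS_split_good (s : String) : pvGoodS (PySem.Str.split₀ s) := by
  rw [pvS_split_eq]
  intro w hw
  simp only [List.map_map, List.mem_map, Function.comp_apply] at hw
  obtain ⟨v, hv, rfl⟩ := hw
  simpa using pv_split_good s.toList v hv

theorem pvS_split_strip (s : String) :
    PySem.Str.split₀ (PySem.Str.strip s) = PySem.Str.split₀ s := by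
  rw [pvS_split_eq, pvS_split_eq]
  have : (PySem.Str.strip s).toList = PySem.Chars.strip s.toList := by simp [PySem.Str.strip]
  rw [this, pv_split_strip]

theorem pvS_join_eq_empty (ws : List String) (h : pvGoodS ws) :
    (PySem.Str.join " " ws = "") ↔ ws = [] := by
  constructor
  · intro he
    by_contra hne
    have : ws.map String.toList ≠ [] := by simpa using hne
    have := pv_join_ne_nil _ h this
    rw [← pvS_join_toList] at this
    exact this (by rw [he]; rfl)
  · rintro rfl; rfl

-- countdown overlap search over the (≤6-word) lowered tail/head: proof-level bridge
def pvOvT (tl hd : List String) : Nat → Nat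
  | 0 => 0
  | size + 1 =>
    if PySem.List.slice tl (some (-((size + 1 : Nat) : Int))) none
        == PySem.List.slice hd none (some ((size + 1 : Nat) : Int))
    then size + 1
    else pvOvT tl hd size

theorem pv_overlap_eq (ws sw : List String) :
    ∀ m, m ≤ min (min ws.length sw.length) 6 →
      pvOverlapA ws sw m
        = pvOvT ((PySem.List.slice ws (some (-6)) none).map PySem.Str.lower)
                ((PySem.List.slice sw none (some 6)).map PySem.Str.lower) m := by
  have htl : (PySem.List.slice ws (some (-6)) none) = ws.drop (ws.length - 6) := by
    exact PySem.List.slice_from_neg_ofNat ws 6 (by norm_num)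
  have hhd : (PySem.List.slice sw none (some 6)) = sw.take 6 := by
    have := PySem.List.slice_to sw (b := 6) (by norm_num)
    simpa using this
  intro m
  induction m with
  | zero => intro _; rfl
  | succ size ih =>
    intro hm
    rw [pvOverlapA, pvOvT]
    have hA : (PySem.List.slice ws (some (-((size + 1 : Nat) : Int))) none).map PySem.Str.lower
        = PySem.List.slice ((PySem.List.slice ws (some (-6)) none).map PySem.Str.lower)
            (some (-((size + 1 : Nat) : Int))) none := by
      rw [htl, PySem.List.slice_from_neg_natCast _ (size+1) (by omega),
          PySem.List.slice_from_neg_natCast _ (size+1) (by omega)]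
      rw [List.length_map, List.length_drop, ← List.map_drop, List.drop_drop]
      congr 2
      omega
    have hB : (PySem.List.slice sw none (some ((size + 1 : Nat) : Int))).map PySem.Str.lower
        = PySem.List.slice ((PySem.List.slice sw none (some 6)).map PySem.Str.lower)
            none (some ((size + 1 : Nat) : Int)) := by
      rw [hhd, PySem.List.slice_to _ (by positivity), PySem.List.slice_to _ (by positivity)]
      rw [← List.map_take, List.take_take]
      congr 2
      simp only [Int.toNat_natCast]
      omega
    rw [← hA, ← hB]
    by_cases hc : (PySem.List.slice ws (some (-((size + 1 : Nat) : Int))) none).map PySem.Str.lower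
        = (PySem.List.slice sw none (some ((size + 1 : Nat) : Int))).map PySem.Str.lower
    · rw [if_pos (by simpa using hc), if_pos (by simpa using hc)]
    · rw [if_neg (by simpa using hc), if_neg (by simpa using hc)]
      exact ih (by omega)

theorem pv_good_append (ws l : List String) (h : pvGoodS ws) (h' : pvGoodS l) :
    pvGoodS (ws ++ l) := by
  intro w hw
  simp only [List.map_append, List.mem_append] at hw
  rcases hw with hw | hw
  · exact h w hw
  · exact h' w hw

theorem pv_good_drop (l : List String) (n : Nat) (h : pvGoodS l) : pvGoodS (l.drop n) := by
  intro w hw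
  exact h w (by rw [List.map_drop] at hw; exact List.mem_of_mem_drop hw)

-- ===== bitap machinery of B ⇒ A's countdown overlap =====

-- survivor predicate after the whole tail has been scanned
def pvP (tl hd : List String) (p : Int) : Bool :=
  (PySem.List.enumerate tl 0).all (fun iw => pvAliveFilter hd iw p)

theorem pv_foldl_filter (L : List (Int × String)) (hd : List String) :
    ∀ a0 : List Int, L.foldl (fun a iw => a.filter (pvAliveFilter hd iw)) a0
      = a0.filter (fun p => L.all (fun iw => pvAliveFilter hd iw p)) := by
  induction L with
  | nil => intro a0; simp
  | cons iw L ih =>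
    intro a0
    rw [List.foldl_cons, ih, List.filter_filter]
    refine List.filter_congr ?_
    intro p _
    simp [Bool.and_comm]

theorem pv_P_iff (tl hd : List String) (k : Nat) (hk1 : 1 ≤ k)
    (hkt : k ≤ tl.length) (hkh : k ≤ hd.length) :
    pvP tl hd ((tl.length : Int) - k) = true ↔
      (PySem.List.slice tl (some (-(k : Int))) none = PySem.List.slice hd none (some (k : Int))) := by
  rw [PySem.List.slice_from_neg_natCast tl k (by omega), PySem.List.slice_to hd (by positivity)]
  unfold pvP
  rw [List.all_eq_true]
  constructor
  · intro h
    apply List.ext_getElem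
    · simp [Int.toNat_natCast]; omega
    · intro j hj1 hj2
      simp only [List.length_drop] at hj1
      have hmem : ((((tl.length - k + j : Nat)) : Int), tl[tl.length - k + j]) ∈ PySem.List.enumerate tl 0 := by
        rw [PySem.List.mem_enumerate_iff]
        exact ⟨tl.length - k + j, by omega, by simp⟩
      have := h _ hmem
      unfold pvAliveFilter at this
      simp only at this
      have hlt : ¬ (((tl.length - k + j : Nat) : Int) < (tl.length : Int) - k) := by
        push_cast; omega
      rw [decide_eq_false hlt, Bool.false_or, beq_iff_eq] at this
      have hidx : ((tl.length - k + j : Nat) : Int) - ((tl.length : Int) - k) = (j : Int) := by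
        push_cast [Nat.cast_sub hkt]; ring
      rw [hidx, PySem.List.pyGet?_natCast] at this
      have hj3 : j < hd.length := by
        simp only [Int.toNat_natCast, List.length_take] at hj2; omega
      rw [List.getElem?_eq_getElem hj3] at this
      have : hd[j] = tl[tl.length - k + j] := by simpa using this
      simp only [List.getElem_drop, List.getElem_take, Int.toNat_natCast]
      rw [← this]
  · intro heq iw hmem
    rw [PySem.List.mem_enumerate_iff] at hmem
    obtain ⟨i, hi, rfl⟩ := hmem
    unfold pvAliveFilter
    simp only [Int.zero_add]
    by_cases hip : (i:Int) < (tl.length : Int) - k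
    · simp [hip]
    · rw [decide_eq_false hip, Bool.false_or, beq_iff_eq]
      have hik : tl.length - k ≤ i := by omega
      have hidx : ((i : Int)) - ((tl.length : Int) - k) = ((i - (tl.length - k) : Nat) : Int) := by
        push_cast [Nat.cast_sub hkt, Nat.cast_sub hik]; ring
      rw [hidx, PySem.List.pyGet?_natCast]
      have hj : i - (tl.length - k) < k := by omega
      rw [List.getElem?_eq_getElem (by omega : i - (tl.length - k) < hd.length)]
      have h2 : (List.drop (tl.length - k) tl)[i - (tl.length - k)]? = (List.take (k:Int).toNat hd)[i - (tl.length - k)]? := by rw [heq]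
      rw [List.getElem?_drop] at h2
      have h3 : tl.length - k + (i - (tl.length - k)) = i := by omega
      rw [h3, List.getElem?_eq_getElem hi] at h2
      have h4 : (List.take (k:Int).toNat hd)[i - (tl.length - k)]? = hd[i - (tl.length - k)]? := by
        refine List.getElem?_take_of_lt ?_
        simp only [Int.toNat_natCast]
        omega
      rw [h4, List.getElem?_eq_getElem (by omega : i - (tl.length - k) < hd.length)] at h2
      simp only [Option.some.injEq] at h2 ⊢
      exact h2.symm

theorem pv_alive_eq (tl hd : List String) :
    ∀ m, m ≤ min tl.length hd.length →
      (match (PySem.List.pyRange ((tl.length : Int) - m) (tl.length : Int) 1).filter (pvP tl hd) with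
       | [] => (0 : Int) | p :: _ => (tl.length : Int) - p)
      = ((pvOvT tl hd m : Nat) : Int) := by
  intro m
  induction m with
  | zero =>
    intro _
    rw [PySem.List.pyRange_one_eq_nil (by simp)]
    rfl
  | succ size ih =>
    intro hm
    rw [PySem.List.pyRange_one_cons (by push_cast; omega), List.filter_cons]
    rw [pvOvT]
    have hiff := pv_P_iff tl hd (size + 1) (by omega) (by omega) (by omega)
    by_cases hc : PySem.List.slice tl (some (-((size + 1 : Nat) : Int))) none
        = PySem.List.slice hd none (some ((size + 1 : Nat) : Int))
    · have hp : pvP tl hd ((tl.length : Int) - ((size + 1 : Nat) : Int)) = true := hiff.mpr hc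
      rw [if_pos hp, if_pos (beq_iff_eq.mpr hc)]
      show (tl.length : Int) - ((tl.length : Int) - ((size + 1 : Nat) : Int)) = _
      push_cast
      ring
    · have hp : ¬ (pvP tl hd ((tl.length : Int) - ((size + 1 : Nat) : Int)) = true) := by
        rw [hiff]; exact hc
      rw [if_neg hp, if_neg (fun h => hc (beq_iff_eq.mp h))]
      have harith : (tl.length : Int) - ((size + 1 : Nat) : Int) + 1 = (tl.length : Int) - (size : Int) := by
        push_cast; ring
      rw [harith]
      exact ih (by omega)

-- B's step computes A's merged word list (for nonempty current words)
theorem pv_stepB_eq (ws sw : List String) :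
    pvStepB ws sw
      = ws ++ PySem.List.slice sw (some ((pvOverlapA ws sw (min (min ws.length sw.length) 6) : Nat) : Int)) none := by
  unfold pvStepB
  simp only []
  set tl := (PySem.List.slice ws (some (-6)) none).map PySem.Str.lower with htl
  set hd := (PySem.List.slice sw none (some 6)).map PySem.Str.lower with hhd
  have hlen : min tl.length hd.length = min (min ws.length sw.length) 6 := by
    rw [htl, hhd, PySem.List.slice_from_neg_ofNat ws 6 (by norm_num), PySem.List.slice_to sw (by norm_num)]
    simp only [List.length_map, List.length_drop, List.length_take, show ((6:Int)).toNat = 6 from rfl]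
    omega
  rw [pv_foldl_filter]
  rw [show (fun p => (PySem.List.enumerate tl 0).all (fun iw => pvAliveFilter hd iw p)) = pvP tl hd from rfl]
  rw [pv_alive_eq tl hd (min tl.length hd.length) (le_refl _)]
  rw [hlen, ← pv_overlap_eq ws sw _ (le_refl _)]

-- fold-level merge used to relate both sides
def pvMerge (ws seg : List String) : List String :=
  if ws = [] then seg else pvStepB ws seg

theorem pv_merge_good (ws seg : List String) (h : pvGoodS ws) (h' : pvGoodS seg) :
    pvGoodS (pvMerge ws seg) := by
  unfold pvMerge
  by_cases hw : ws = []
  · rw [if_pos hw]; exact h'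
  · rw [if_neg hw, pv_stepB_eq, PySem.List.slice_from_natCast]
    exact pv_good_append _ _ h (pv_good_drop _ _ h')

theorem pv_step_eq (ws : List String) (h : pvGoodS ws) (raw : String) :
    pvStepA (PySem.Str.join " " ws) raw
      = PySem.Str.join " " (if (PySem.Str.split₀ raw = [] ∨ PySem.Str.split₀ raw = ["(no", "speech", "detected)"])
          then ws else pvMerge ws (PySem.Str.split₀ raw)) := by
  simp only [pvStepA]
  rw [pvS_split_strip]
  set sw := PySem.Str.split₀ raw with hsw
  have hswg : pvGoodS sw := pvS_split_good raw
  by_cases hskip : sw = [] ∨ sw = ["(no", "speech", "detected)"]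
  · have hA : (PySem.Str.join " " sw == "" || PySem.Str.join " " sw == "(no speech detected)") = true := by
      rcases hskip with h1 | h1 <;> rw [h1] <;> rfl
    rw [if_pos hskip]
    simp only [hA, if_true]
  · have hskip' := hskip
    push Not at hskip'
    have hA : (PySem.Str.join " " sw == "" || PySem.Str.join " " sw == "(no speech detected)") = false := by
      rw [Bool.or_eq_false_iff, beq_eq_false_iff_ne, beq_eq_false_iff_ne]
      constructor
      · intro he; exact hskip'.1 ((pvS_join_eq_empty sw hswg).mp he)
      · intro he
        have : PySem.Str.split₀ (PySem.Str.join " " sw) = PySem.Str.split₀ "(no speech detected)" := by rw [he]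
        rw [pvS_split_join sw hswg] at this
        exact hskip'.2 (by rw [this]; rfl)
    simp only [hA, Bool.false_eq_true, if_false]
    rw [if_neg hskip]
    unfold pvMerge
    by_cases hemp : ws = []
    · subst hemp
      have he : (PySem.Str.join " " ([] : List String) == "") = true := rfl
      rw [if_pos rfl]
      simp only [he, if_true]
    · have h1 : (PySem.Str.join " " ws == "") = false := by
        rw [beq_eq_false_iff_ne]
        intro he; exact hemp ((pvS_join_eq_empty ws h).mp he)
      rw [if_neg hemp]
      simp only [h1, Bool.false_eq_true, if_false]
      rw [pvS_split_join ws h, pvS_split_join sw hswg]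
      rw [pv_stepB_eq ws sw]
      set ov := pvOverlapA ws sw (min (min ws.length sw.length) 6) with hovd
      by_cases hz : ov ≠ 0
      · rw [if_pos hz]
      · rw [if_neg hz]
        push Not at hz
        rw [← String.toList_inj]
        rw [String.toList_append, String.toList_append, pvS_join_toList, pvS_join_toList, pvS_join_toList]
        rw [hz, PySem.List.slice_from_natCast]
        simp only [List.drop_zero, List.map_append]
        rw [pv_join_append _ _ (by simpa using hemp) (by simpa using hskip'.1)]
        rw [List.append_assoc]
        rfl

theorem pv_cleanB_cons (raw : String) (rest : List String) :
    pvCleanB (raw :: rest)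
      = if (PySem.Str.split₀ raw = [] ∨ PySem.Str.split₀ raw = ["(no", "speech", "detected)"])
        then pvCleanB rest else PySem.Str.split₀ raw :: pvCleanB rest := by
  unfold pvCleanB
  rw [List.map_cons, List.filter_cons]
  by_cases hskip : PySem.Str.split₀ raw = [] ∨ PySem.Str.split₀ raw = ["(no", "speech", "detected)"]
  · have hb : (!(PySem.Str.split₀ raw == ([] : List String)) && !(PySem.Str.split₀ raw == ["(no", "speech", "detected)"])) = false := by
      rcases hskip with h1 | h1 <;> rw [h1] <;> rfl
    rw [if_pos hskip]
    simp only [hb, Bool.false_eq_true, if_false]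
  · have hskip' := hskip
    push Not at hskip'
    have hb : (!(PySem.Str.split₀ raw == ([] : List String)) && !(PySem.Str.split₀ raw == ["(no", "speech", "detected)"])) = true := by
      simp [hskip'.1, hskip'.2]
    simp only [hb, if_true]
    rw [if_neg hskip]

theorem pv_fold_eq (segments : List String) :
    ∀ ws, pvGoodS ws →
      segments.foldl pvStepA (PySem.Str.join " " ws) = PySem.Str.join " " ((pvCleanB segments).foldl pvMerge ws)
        ∧ pvGoodS ((pvCleanB segments).foldl pvMerge ws) := by
  induction segments with
  | nil =>
    intro ws h
    constructor
    · rfl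
    · exact h
  | cons raw rest ih =>
    intro ws h
    rw [List.foldl_cons, pv_step_eq ws h raw, pv_cleanB_cons]
    by_cases hskip : PySem.Str.split₀ raw = [] ∨ PySem.Str.split₀ raw = ["(no", "speech", "detected)"]
    · rw [if_pos hskip, if_pos hskip]
      exact ih ws h
    · rw [if_neg hskip, if_neg hskip, List.foldl_cons]
      exact ih (pvMerge ws (PySem.Str.split₀ raw)) (pv_merge_good _ _ h (pvS_split_good raw))

theorem pv_merge_fold_eq (cs : List (List String)) :
    ∀ ws, ws ≠ [] → cs.foldl pvMerge ws = cs.foldl pvStepB ws := by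
  induction cs with
  | nil => intro ws _; rfl
  | cons c cs ih =>
    intro ws hne
    rw [List.foldl_cons, List.foldl_cons]
    have hm : pvMerge ws c = pvStepB ws c := by unfold pvMerge; rw [if_neg hne]
    rw [hm]
    refine ih _ ?_
    rw [pv_stepB_eq]
    simp [hne]

theorem pv_cleanB_ne_nil (segments : List String) :
    ∀ c ∈ pvCleanB segments, c ≠ [] := by
  intro c hc
  unfold pvCleanB at hc
  rw [List.mem_filter] at hc
  have := hc.2
  simp only [Bool.and_eq_true, Bool.not_eq_eq_eq_not, Bool.not_true, beq_eq_false_iff_ne] at this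
  exact this.1

-- ===== VERDICT (by name: the statement is the Claim_ definition above) =====
theorem merge_transcript_segments_spec : Claim_equal_merge_transcript_segments := by
  intro segments _
  unfold Spec_merge_transcript_segments merge_transcript_segments merge_transcript_segments_alt
  have h0 : pvGoodS ([] : List String) := by intro w hw; simp at hw
  obtain ⟨h1, h2⟩ := pv_fold_eq segments [] h0
  have he : (PySem.Str.join " " ([] : List String)) = "" := rfl
  rw [he] at h1
  rw [h1]
  cases hcl : pvCleanB segments with
  | nil =>
    rfl
  | cons c cs =>
    rw [hcl] at h2
    have hstep0 : pvMerge [] c = c := by unfold pvMerge; rw [if_pos rfl]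
    rw [List.foldl_cons, hstep0] at h2 ⊢
    have hcne : c ≠ [] := pv_cleanB_ne_nil segments c (by rw [hcl]; simp)
    rw [pv_merge_fold_eq cs c hcne] at h2 ⊢
    rw [← String.toList_inj]
    have hst : (PySem.Str.strip (PySem.Str.join " " (cs.foldl pvStepB c))).toList
        = PySem.Chars.strip (PySem.Str.join " " (cs.foldl pvStepB c)).toList := by
      simp [PySem.Str.strip]
    rw [hst, pvS_join_toList, pv_strip_join _ h2, ← pvS_join_toList]
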